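-- pv_equiv track=rewrite | github.com/froonn/AOIS_sem4 | lw1/main.py | reverse_code
-- ===== SOURCE A (Python) =====
-- def dec_to_bin(n, bits):
--     if bits == 0:
--         return ''
--     if n == 0:
--         return '0' * bits
--     binary = ''
--     count = 0
--     while n > 0 and count < bits:
--         binary = str(n % 2) + binary
--         n = n // 2
--         count += 1
--     while len(binary) < bits:
--         binary = '0' + binary
--     return binary[-bits:]
--
-- def direct_code(n, bits):
--     if n >= 0:
--         return '0' + dec_to_bin(n, bits-1)
--     else:
--         return '1' + dec_to_bin(abs(n), bits-1)
--
-- def reverse_code(n, bits):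
--     direct = direct_code(n, bits)
--     if n >= 0:
--         return direct
--     sign = direct[0]
--     magnitude = direct[1:]
--     inverted = ''.join(['1' if b == '0' else '0' for b in magnitude])
--     return sign + inverted
-- ===== SOURCE B (Python) =====
-- def reverse_code(n, bits):
--     width = bits - 1
--     sign = '1' if n < 0 else '0'
--     if width <= 0:
--         return sign
--     m = abs(n) & ((1 << width) - 1)
--     if n < 0:
--         m = (1 << width) - 1 - m
--     return sign + format(m, '0{}b'.format(width))
-- ===== Notes on version B (the rewrite author's own statement) =====
-- stated objective: faster
-- what changed: Replaces A's digit-accumulation while-loop, zero-padding loop, slice and per-character bit-inversion comprehension with masking the magnitude (abs(n) & (2^width-1)) and taking the arithmetic ones' complement (2^width-1)-m for negatives, rendered once with format().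
import Mathlib
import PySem

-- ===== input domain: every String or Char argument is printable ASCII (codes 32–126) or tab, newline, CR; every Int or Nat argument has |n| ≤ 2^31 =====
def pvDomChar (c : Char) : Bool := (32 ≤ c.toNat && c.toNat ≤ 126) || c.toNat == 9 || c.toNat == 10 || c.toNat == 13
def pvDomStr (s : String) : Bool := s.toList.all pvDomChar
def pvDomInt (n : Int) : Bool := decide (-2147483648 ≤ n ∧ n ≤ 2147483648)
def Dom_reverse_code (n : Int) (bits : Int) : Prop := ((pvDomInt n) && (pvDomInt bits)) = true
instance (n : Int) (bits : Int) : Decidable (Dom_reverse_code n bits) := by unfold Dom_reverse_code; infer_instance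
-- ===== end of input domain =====

-- B replaces A's digit-accumulation loop, zero-pad loop and per-character bit-inversion
-- comprehension by masking the magnitude and taking the arithmetic complement (2^w-1)-m,
-- then rendering once (objective: faster; A builds its string by repeated prepending).

-- ===== PORT A =====
-- while n > 0 and count < bits: binary = str(n % 2) + binary; n = n // 2; count += 1
def decToBinLoop (n : Int) (count : Int) (bits : Int) (binary : List Char) : List Char :=
  if _h : 0 < n ∧ count < bits then
    decToBinLoop (PySem.Int.floordiv n 2) (count + 1) bits
      (PySem.Int.toChars (PySem.Int.mod n 2) ++ binary)
  else binary
termination_by (bits - count).toNat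
decreasing_by omega

-- while len(binary) < bits: binary = '0' + binary
def padLoop (bits : Int) (binary : List Char) : List Char :=
  if _h : (binary.length : Int) < bits then padLoop bits ('0' :: binary) else binary
termination_by (bits - binary.length).toNat
decreasing_by simp; omega

def dec_to_bin_port (n : Int) (bits : Int) : List Char :=
  if bits = 0 then []
  else if n = 0 then List.replicate bits.toNat '0'   -- '0' * bits (empty for bits < 0)
  else
    -- binary = padLoop..., then binary[-bits:]
    PySem.List.slice (padLoop bits (decToBinLoop n 0 bits [])) (some (-bits)) none

def direct_code_port (n : Int) (bits : Int) : List Char :=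
  if n ≥ 0 then '0' :: dec_to_bin_port n (bits - 1)
  else '1' :: dec_to_bin_port |n| (bits - 1)

def reverse_code (n : Int) (bits : Int) : String :=
  let direct := direct_code_port n bits
  if n ≥ 0 then String.ofList direct
  else
    let sign := PySem.List.pyGetD direct 0 ' '        -- direct[0] (always in range: direct is nonempty)
    let magnitude := PySem.List.slice direct (some 1) none
    let inverted := magnitude.map (fun b => if b = '0' then '1' else '0')
    String.ofList (sign :: inverted)

-- ===== PORT B =====
-- format(m, '0{w}b'): w-digit zero-padded binary rendering; exact for m < 2^w,
-- which B's mask guarantees (hand port of the format() call).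
def formatBin (w : Nat) (m : Nat) : List Char :=
  match w with
  | 0 => []
  | w + 1 => formatBin w (m / 2) ++ [if m % 2 = 1 then '1' else '0']

def reverse_code_alt (n : Int) (bits : Int) : String :=
  let width := bits - 1
  let sign : Char := if n < 0 then '1' else '0'
  if width ≤ 0 then String.ofList [sign]
  else
    let m := PySem.Int.band |n| ((1 : Int) <<< width.toNat - 1)       -- abs(n) & ((1 << width) - 1)
    let m2 := if n < 0 then (1 : Int) <<< width.toNat - 1 - m else m  -- arithmetic ones' complement
    String.ofList (sign :: formatBin width.toNat m2.toNat)      -- m2 is nonnegative: toNat is exact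

-- ===== PRECONDITION & SPEC =====
def Spec_reverse_code (n : Int) (bits : Int) (out : String) : Prop := out = reverse_code_alt n bits
instance (n : Int) (bits : Int) (out : String) : Decidable (Spec_reverse_code n bits out) := by unfold Spec_reverse_code; infer_instance

-- ===== CLAIM (what is proved, stated in full; the proofs are below) =====
def Claim_equal_reverse_code : Prop := ∀ (n : Int) (bits : Int), Dom_reverse_code n bits → Spec_reverse_code n bits (reverse_code n bits)

-- ===== LEMMAS AND PROOFS =====

-- the digits A's while-loop emits: low bits of m, most significant first, stopping at m = 0 or after w digits
def trimBits : Nat → Nat → List Char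
  | _, 0 => []
  | m, w + 1 => if m = 0 then [] else trimBits (m / 2) w ++ [if m % 2 = 1 then '1' else '0']

theorem decToBinLoop_eq (w : Nat) : ∀ (m : Nat) (c bits : Int) (acc : List Char),
    (bits - c).toNat = w → decToBinLoop (m : Int) c bits acc = trimBits m w ++ acc := by
  induction w with
  | zero =>
    intro m c bits acc hw
    rw [decToBinLoop, dif_neg (by omega), trimBits]
    simp
  | succ w ih =>
    intro m c bits acc hw
    by_cases hm : m = 0
    · subst hm
      rw [decToBinLoop, dif_neg (by simp), trimBits, if_pos rfl]
      simp
    · rw [decToBinLoop, dif_pos ⟨by exact_mod_cast Nat.pos_of_ne_zero hm, by omega⟩]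
      rw [show PySem.Int.floordiv (m : Int) 2 = ((m / 2 : Nat) : Int) from PySem.Int.floordiv_natCast m 2]
      rw [show PySem.Int.mod (m : Int) 2 = ((m % 2 : Nat) : Int) from PySem.Int.mod_natCast m 2]
      rw [ih (m / 2) (c + 1) bits _ (by omega)]
      rw [trimBits, if_neg hm]
      rcases Nat.mod_two_eq_zero_or_one m with h2 | h2 <;>
        simp [h2, PySem.Int.toChars, show Nat.toDigits 10 1 = ['1'] from by decide,
          show Nat.toDigits 10 0 = ['0'] from by decide]

theorem padLoop_eq (k : Nat) : ∀ (bits : Int) (l : List Char),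
    (bits - l.length).toNat = k → padLoop bits l = List.replicate k '0' ++ l := by
  induction k with
  | zero =>
    intro bits l hk
    rw [padLoop, dif_neg (by omega)]
    simp
  | succ k ih =>
    intro bits l hk
    rw [padLoop, dif_pos (by omega)]
    rw [ih bits ('0' :: l) (by simp; omega)]
    rw [List.replicate_succ']
    simp

theorem formatBin_zero (w : Nat) : formatBin w 0 = List.replicate w '0' := by
  induction w with
  | zero => rfl
  | succ w ih => rw [formatBin, List.replicate_succ']; simp [ih]

theorem length_formatBin (w m : Nat) : (formatBin w m).length = w := by
  induction w generalizing m with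
  | zero => rfl
  | succ w ih => simp [formatBin, ih]

theorem pad_trimBits (w : Nat) : ∀ m : Nat,
    List.replicate (w - (trimBits m w).length) '0' ++ trimBits m w = formatBin w m := by
  induction w with
  | zero => intro m; rfl
  | succ w ih =>
    intro m
    by_cases hm : m = 0
    · subst hm
      rw [trimBits, if_pos rfl, formatBin]
      simp [formatBin_zero, List.replicate_succ']
    · rw [trimBits, if_neg hm, formatBin]
      have hlen := congrArg List.length (ih (m / 2))
      simp [length_formatBin] at hlen
      simp only [List.length_append, List.length_singleton]
      rw [show w + 1 - ((trimBits (m / 2) w).length + 1) = w - (trimBits (m / 2) w).length by omega]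
      rw [← List.append_assoc, ih (m / 2)]

theorem length_trimBits_le (w m : Nat) : (trimBits m w).length ≤ w := by
  have h := congrArg List.length (pad_trimBits w m)
  simp [length_formatBin] at h
  omega

theorem formatBin_mod (w : Nat) : ∀ m : Nat, formatBin w (m % 2 ^ w) = formatBin w m := by
  induction w with
  | zero => intro m; rfl
  | succ w ih =>
    intro m
    rw [formatBin, formatBin]
    have h1 : m % 2 ^ (w + 1) / 2 = m / 2 % 2 ^ w := by
      rw [pow_succ, mul_comm]
      exact Nat.mod_mul_right_div_self m 2 (2 ^ w)
    have h2 : m % 2 ^ (w + 1) % 2 = m % 2 := by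
      apply Nat.mod_mod_of_dvd
      exact ⟨2 ^ w, by ring⟩
    rw [h1, h2, ih]

theorem formatBin_invert (w : Nat) : ∀ m : Nat, m < 2 ^ w →
    (formatBin w m).map (fun b => if b = '0' then '1' else '0')
      = formatBin w (2 ^ w - 1 - m) := by
  induction w with
  | zero => intro m _; rfl
  | succ w ih =>
    intro m hm
    have hp : (2 : Nat) ^ (w + 1) = 2 * 2 ^ w := by ring
    have hdm := Nat.div_add_mod m 2
    have hr : m % 2 < 2 := Nat.mod_lt m (by norm_num)
    have hq : m / 2 < 2 ^ w := by omega
    have hkey : 2 ^ (w + 1) - 1 - m = 2 * (2 ^ w - 1 - m / 2) + (1 - m % 2) := by omega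
    rw [formatBin, List.map_append, ih (m / 2) hq, formatBin, hkey]
    have hdiv : (2 * (2 ^ w - 1 - m / 2) + (1 - m % 2)) / 2 = 2 ^ w - 1 - m / 2 := by
      rw [Nat.mul_add_div (by norm_num)]
      omega
    have hmod : (2 * (2 ^ w - 1 - m / 2) + (1 - m % 2)) % 2 = 1 - m % 2 := by
      rw [Nat.mul_add_mod]
      omega
    rw [hdiv, hmod]
    rcases Nat.mod_two_eq_zero_or_one m with h2 | h2 <;> simp [h2]

-- A's dec_to_bin for a nonnegative argument and positive width is exactly formatBin
theorem dec_to_bin_port_eq (m : Nat) (bits : Int) (hb : 0 < bits) :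
    dec_to_bin_port (m : Int) bits = formatBin bits.toNat m := by
  rw [dec_to_bin_port, if_neg (by omega)]
  by_cases hm : m = 0
  · subst hm
    norm_num [formatBin_zero]
  · rw [if_neg (by exact_mod_cast hm)]
    set w := bits.toNat with hw
    have hbw : bits = (w : Int) := by omega
    rw [decToBinLoop_eq w m 0 bits [] (by omega), List.append_nil]
    have hlen := length_trimBits_le w m
    rw [padLoop_eq (w - (trimBits m w).length) bits (trimBits m w) (by omega)]
    rw [pad_trimBits w m]
    rw [hbw, PySem.List.slice_from_neg_natCast (formatBin w m) w (by omega)]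
    rw [length_formatBin]
    simp

-- degenerate width: dec_to_bin returns the empty string for bits ≤ 0
theorem dec_to_bin_port_nonpos (n : Int) (bits : Int) (hb : bits ≤ 0) :
    dec_to_bin_port n bits = [] := by
  rw [dec_to_bin_port]
  by_cases h0 : bits = 0
  · rw [if_pos h0]
  · rw [if_neg h0]
    by_cases hn : n = 0
    · rw [if_pos hn]
      simp [Int.toNat_of_nonpos hb]
    · rw [if_neg hn]
      rw [decToBinLoop, dif_neg (by omega)]
      rw [padLoop, dif_neg (by simp; omega)]
      simp [PySem.List.slice_some_none]

-- ===== VERDICT (by name: the statement is the Claim_ definition above) =====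
theorem reverse_code_spec : Claim_equal_reverse_code := by
  intro n bits _
  unfold Spec_reverse_code
  by_cases hw : bits - 1 ≤ 0
  · -- degenerate width: both sides are just the sign character
    by_cases hn : n < 0
    · simp only [reverse_code, reverse_code_alt, direct_code_port, if_pos hw,
        dec_to_bin_port_nonpos _ _ hw, if_neg (by omega : ¬ n ≥ 0), if_pos hn,
        PySem.List.pyGetD_zero_cons, PySem.List.slice_from_one, List.tail_cons, List.map_nil]
    · simp only [reverse_code, reverse_code_alt, direct_code_port, if_pos hw,
        dec_to_bin_port_nonpos _ _ hw, if_pos (by omega : n ≥ 0), if_neg hn]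
  · set w := (bits - 1).toNat with hwdef
    have hbw : bits - 1 = (w : Int) := by omega
    have hwpos : 0 < w := by omega
    set a := n.natAbs with hadef
    have habs : |n| = ((a : Nat) : Int) := Int.abs_eq_natAbs n
    have h1 : (1 : Int) <<< w = ((2 ^ w : Nat) : Int) := by simp [Int.shiftLeft_eq]
    have hp2 : 1 ≤ 2 ^ w := Nat.one_le_two_pow
    have hmask : PySem.Int.band ((a : Nat) : Int) ((1 : Int) <<< w - 1) = ((a % 2 ^ w : Nat) : Int) := by
      rw [h1, show ((2 ^ w : Nat) : Int) - 1 = ((2 ^ w - 1 : Nat) : Int) by omega,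
        PySem.Int.band_natCast, Nat.and_two_pow_sub_one_eq_mod]
    have hlt : a % 2 ^ w < 2 ^ w := Nat.mod_lt a (Nat.two_pow_pos w)
    have hwz : ¬ ((w : Nat) : Int) ≤ 0 := by omega
    have hdA : dec_to_bin_port ((a : Nat) : Int) ((w : Nat) : Int) = formatBin w a := by
      rw [dec_to_bin_port_eq a _ (by exact_mod_cast hwpos)]
      simp
    by_cases hn : n < 0
    · -- negative: A inverts the magnitude character by character; B takes 2^w-1-m
      have hm2 : (1 : Int) <<< w - 1 - ((a % 2 ^ w : Nat) : Int)
          = ((2 ^ w - 1 - a % 2 ^ w : Nat) : Int) := by rw [h1]; omega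
      simp only [reverse_code, reverse_code_alt, direct_code_port,
        if_neg (show ¬ n ≥ 0 by omega), if_pos hn, hbw, hwz, ite_false, hdA, habs,
        hmask, hm2, Int.toNat_natCast,
        PySem.List.pyGetD_zero_cons, PySem.List.slice_from_one, List.tail_cons]
      rw [← formatBin_mod w a, formatBin_invert w (a % 2 ^ w) hlt]
    · -- nonnegative: both sides render the masked magnitude
      have hdn : dec_to_bin_port n ((w : Nat) : Int) = formatBin w a := by
        rw [show n = ((a : Nat) : Int) by omega]
        exact hdA
      simp only [reverse_code, reverse_code_alt, direct_code_port,
        if_pos (show n ≥ 0 by omega), if_neg hn, hbw, if_neg hwz, hdn, habs,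
        hmask, Int.toNat_natCast]
      rw [formatBin_mod]
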